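-- pv_equiv track=rewrite | github.com/kurtbell87/orchestration-kit | dashboard/payloads.py | _root_for_run
-- ===== SOURCE A (Python) =====
-- def _root_for_run(run_id: str, parents: dict[str, str | None]) -> str:
--     current = run_id
--     seen: set[str] = set()
--     while True:
--         if current in seen:
--             return run_id
--         seen.add(current)
--         parent = parents.get(current)
--         if not isinstance(parent, str) or parent not in parents:
--             return current
--         current = parent
-- ===== SOURCE B (Python) =====
-- def _root_for_run(run_id: str, parents: dict[str, str | None]) -> str:
--     # Floyd tortoise-and-hare: constant-memory cycle detection instead of a visited set.
--     def _step(node):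
--         parent = parents.get(node)
--         if not isinstance(parent, str) or parent not in parents:
--             return None
--         return parent
--
--     slow = fast = run_id
--     while True:
--         nxt = _step(fast)
--         if nxt is None:
--             return fast
--         fast = _step(nxt)
--         if fast is None:
--             return nxt
--         slow = _step(slow)
--         if slow == fast:
--             return run_id
-- ===== Notes on version B (the rewrite author's own statement) =====
-- stated objective: alternative
-- what changed: Cycle detection by Floyd's tortoise-and-hare (two pointers, O(1) extra memory) instead of A's growing visited set.
import Mathlib
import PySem

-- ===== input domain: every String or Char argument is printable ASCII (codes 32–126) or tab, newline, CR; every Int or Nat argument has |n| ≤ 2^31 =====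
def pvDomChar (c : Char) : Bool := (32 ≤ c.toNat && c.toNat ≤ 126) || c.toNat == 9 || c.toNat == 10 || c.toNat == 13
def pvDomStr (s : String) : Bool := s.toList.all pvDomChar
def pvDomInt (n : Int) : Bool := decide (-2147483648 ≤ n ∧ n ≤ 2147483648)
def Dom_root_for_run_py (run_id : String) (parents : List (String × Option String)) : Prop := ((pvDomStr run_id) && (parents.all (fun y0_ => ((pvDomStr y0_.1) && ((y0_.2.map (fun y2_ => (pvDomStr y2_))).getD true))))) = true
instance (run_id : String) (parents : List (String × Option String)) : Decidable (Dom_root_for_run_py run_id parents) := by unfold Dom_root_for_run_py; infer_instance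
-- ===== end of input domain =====

-- B replaces A's growing visited-set cycle detection by Floyd's constant-memory tortoise-and-hare
-- (objective: alternative algorithm; same return value everywhere, no speed claim).

-- ===== PORT A =====
-- A's 'while True' loop is run on fuel parents.length + 2, which is enough for every returning
-- path; the fuel-0 fallback run_id coincides with A's cycle answer, so the port is exact.
def rootForRunLoop (run_id : String) (d : PySem.Dict String (Option String))
    (current : String) (seen : PySem.Set String) : Nat → String
  | 0 => run_id
  | fuel+1 =>
    if PySem.Set.contains seen current then run_id
    else
      match (d.get? current).getD none with
      | some parent =>
          if d.contains parent then
            rootForRunLoop run_id d parent (PySem.Set.add seen current) fuel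
          else current
      | none => current

def root_for_run_py (run_id : String) (parents : List (String × Option String)) : String :=
  rootForRunLoop run_id (PySem.Dict.mk parents) run_id PySem.Set.empty (parents.length + 2)

-- ===== PORT B =====
-- Source B's helper _step: the parent if it is a string and a key of parents, else None.
def pvStep (d : PySem.Dict String (Option String)) (node : String) : Option String :=
  match (d.get? node).getD none with
  | some parent => if d.contains parent then some parent else none
  | none => none

-- Floyd loop; slow is Option String because Python's slow slot would hold None after a
-- (unreachable) failed step — 'slow == fast' then compares unequal exactly like None == str.
def floydLoop (run_id : String) (d : PySem.Dict String (Option String))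
    (slow : Option String) (fast : String) : Nat → String
  | 0 => run_id
  | fuel+1 =>
    match pvStep d fast with
    | none => fast
    | some nxt =>
      match pvStep d nxt with
      | none => nxt
      | some fast' =>
        let slow' := slow.bind (pvStep d)
        if slow' == some fast' then run_id
        else floydLoop run_id d slow' fast' fuel

def root_for_run_py_alt (run_id : String) (parents : List (String × Option String)) : String :=
  floydLoop run_id (PySem.Dict.mk parents) (some run_id) run_id (parents.length + 2)

-- ===== PRECONDITION & SPEC =====
def Spec_root_for_run_py (run_id : String) (parents : List (String × Option String)) (out : String) : Prop := out = root_for_run_py_alt run_id parents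
instance (run_id : String) (parents : List (String × Option String)) (out : String) : Decidable (Spec_root_for_run_py run_id parents out) := by unfold Spec_root_for_run_py; infer_instance

-- ===== CLAIM (what is proved, stated in full; the proofs are below) =====
def Claim_equal_root_for_run_py : Prop := ∀ (run_id : String) (parents : List (String × Option String)), Dom_root_for_run_py run_id parents → Spec_root_for_run_py run_id parents (root_for_run_py run_id parents)

-- ===== LEMMAS AND PROOFS =====

-- the parent chain: pvIter d c k = the node k steps from c (none once the chain has ended)
def pvIter (d : PySem.Dict String (Option String)) (c : String) : Nat → Option String
  | 0 => some c
  | k+1 => (pvIter d c k).bind (pvStep d)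

theorem pvIter_shift (d : PySem.Dict String (Option String)) (c x : String) (i : Nat)
    (h : pvIter d c i = some x) : ∀ m, pvIter d c (i + m) = pvIter d x m := by
  intro m
  induction m with
  | zero => simpa [pvIter] using h
  | succ m ih => simp [pvIter, ih]

-- on a cyclic chain (every iterate defined) A's loop returns run_id for EVERY fuel and seen set
theorem A_cyclic (run_id : String) (d : PySem.Dict String (Option String)) :
    ∀ (fuel : Nat) (c : String) (s : PySem.Set String),
      (∀ m, (pvIter d c m).isSome) → rootForRunLoop run_id d c s fuel = run_id := by
  intro fuel
  induction fuel with
  | zero => intro c s _; rfl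
  | succ fuel ih =>
    intro c s hall
    have h1 : (pvIter d c 1).isSome := hall 1
    rw [rootForRunLoop]
    by_cases hs : PySem.Set.contains s c = true
    · rw [if_pos hs]
    · rw [if_neg hs]
      cases hg : (d.get? c).getD none with
      | none =>
        exfalso
        simp [pvIter, pvStep, hg] at h1
      | some parent =>
        by_cases hc : d.contains parent
        · simp only [hc, if_true]
          apply ih
          intro m
          have hstep : pvIter d c 1 = some parent := by simp [pvIter, pvStep, hg, hc]
          have := pvIter_shift d c parent 1 hstep m
          rw [← this]
          exact hall (1 + m)
        · exfalso
          simp [pvIter, pvStep, hg, hc] at h1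

-- likewise B's Floyd loop returns run_id on a cyclic chain
theorem B_cyclic (run_id : String) (d : PySem.Dict String (Option String)) :
    ∀ (fuel : Nat) (fast : String) (slow : Option String),
      (∀ m, (pvIter d fast m).isSome) → floydLoop run_id d slow fast fuel = run_id := by
  intro fuel
  induction fuel with
  | zero => intro fast slow _; rfl
  | succ fuel ih =>
    intro fast slow hall
    have h1 : (pvIter d fast 1).isSome := hall 1
    have h2 : (pvIter d fast 2).isSome := hall 2
    rw [floydLoop]
    cases hg : pvStep d fast with
    | none => exfalso; simp [pvIter, hg] at h1
    | some nxt =>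
      have hstep1 : pvIter d fast 1 = some nxt := by simp [pvIter, hg]
      cases hg2 : pvStep d nxt with
      | none =>
        exfalso
        have : pvIter d fast 2 = none := by
          have := pvIter_shift d fast nxt 1 hstep1 1
          simp [pvIter, hg2] at this ⊢
          simpa [pvIter] using this
        simp [this] at h2
      | some fast' =>
        simp only [hg2]
        by_cases hmeet : (slow.bind (pvStep d) == some fast') = true
        · rw [if_pos hmeet]
        · rw [if_neg hmeet]
          apply ih
          intro m
          have hstep2 : pvIter d fast 2 = some fast' := by
            have := pvIter_shift d fast nxt 1 hstep1 1
            simp [pvIter] at this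
            simp [pvIter, this, hg2]
          have := pvIter_shift d fast fast' 2 hstep2 m
          rw [← this]
          exact hall (2 + m)

-- acyclic chains: A's loop reaches the terminal t
theorem A_acyclic (run_id : String) (d : PySem.Dict String (Option String)) (r t : String) (k : Nat)
    (hk : pvIter d r k = some t) (hterm : pvStep d t = none)
    (hinj : ∀ i j x, i ≤ k → j ≤ k → pvIter d r i = some x → pvIter d r j = some x → i = j)
    (hsome : ∀ j, j ≤ k → (pvIter d r j).isSome) :
    ∀ (fuel i : Nat) (cur : String) (s : PySem.Set String), i ≤ k → pvIter d r i = some cur →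
      (∀ x ∈ s, ∃ j, j < i ∧ pvIter d r j = some x) → k - i < fuel →
      rootForRunLoop run_id d cur s fuel = t := by
  intro fuel
  induction fuel with
  | zero => intro i cur s _ _ _ hf; omega
  | succ fuel ih =>
    intro i cur s hik hcur hs hf
    have hnotin : cur ∉ s := by
      intro hmem
      obtain ⟨j, hj, hjv⟩ := hs cur hmem
      have := hinj j i cur (by omega) hik hjv hcur
      omega
    rw [rootForRunLoop]
    have hcontains : PySem.Set.contains s cur = false := by
      simp [PySem.Set.contains]
      simpa using hnotin
    simp only [hcontains, if_false, Bool.false_eq_true]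
    by_cases hik' : i = k
    · subst hik'
      have : cur = t := by rw [hcur] at hk; exact (Option.some.injEq _ _).mp hk
      subst this
      cases hg : (d.get? cur).getD none with
      | none => rfl
      | some parent =>
        by_cases hc : d.contains parent
        · exfalso; simp [pvStep, hg, hc] at hterm
        · simp [hc]
    · have hiklt : i < k := lt_of_le_of_ne hik hik'
      have hnext : (pvIter d r (i+1)).isSome := hsome (i+1) (by omega)
      have hnext' : pvIter d r (i+1) = (pvStep d cur) := by simp [pvIter, hcur]
      cases hg : (d.get? cur).getD none with
      | none => exfalso; rw [hnext'] at hnext; simp [pvStep, hg] at hnext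
      | some parent =>
        by_cases hc : d.contains parent
        · simp only [hc, if_true]
          apply ih (i+1) parent _ (by omega) (by rw [hnext']; simp [pvStep, hg, hc])
            _ (by omega)
          intro x hx
          have hadd : PySem.Set.add s cur = s ++ [cur] := by
            simp [PySem.Set.add, PySem.Set.contains] at hcontains ⊢
            simp [hcontains]
          rw [hadd] at hx
          rcases List.mem_append.mp hx with h | h
          · obtain ⟨j, hj, hjv⟩ := hs x h
            exact ⟨j, by omega, hjv⟩
          · exact ⟨i, by omega, (by simpa using h : x = cur) ▸ hcur⟩
        · exfalso; rw [hnext'] at hnext; simp [pvStep, hg, hc] at hnext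

-- acyclic chains: B's Floyd loop also reaches the terminal t, never meeting early
theorem B_acyclic (run_id : String) (d : PySem.Dict String (Option String)) (r t : String) (k : Nat)
    (hk : pvIter d r k = some t) (hterm : pvStep d t = none)
    (hinj : ∀ i j x, i ≤ k → j ≤ k → pvIter d r i = some x → pvIter d r j = some x → i = j)
    (hsome : ∀ j, j ≤ k → (pvIter d r j).isSome) :
    ∀ (fuel a b : Nat) (sl fast : String), a ≤ b → b ≤ k →
      pvIter d r a = some sl → pvIter d r b = some fast → k - b < fuel →
      floydLoop run_id d (some sl) fast fuel = t := by
  intro fuel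
  induction fuel with
  | zero => intro a b sl fast _ _ _ _ hf; omega
  | succ fuel ih =>
    intro a b sl fast hab hbk hsl hfast hf
    have hstep_of : ∀ (j : Nat) (x : String), j ≤ k → pvIter d r j = some x →
        pvIter d r (j+1) = pvStep d x := by
      intro j x _ hj; simp [pvIter, hj]
    rw [floydLoop]
    by_cases hbk' : b = k
    · subst hbk'
      have : fast = t := by rw [hfast] at hk; exact (Option.some.injEq _ _).mp hk
      subst this
      simp [hterm]
    · have hblt : b < k := lt_of_le_of_ne hbk hbk'
      have h1 : (pvIter d r (b+1)).isSome := hsome (b+1) (by omega)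
      rw [hstep_of b fast hbk hfast] at h1
      cases hg : pvStep d fast with
      | none => exfalso; simp [hg] at h1
      | some nxt =>
        have hnxt : pvIter d r (b+1) = some nxt := by rw [hstep_of b fast hbk hfast, hg]
        by_cases hbk2 : b + 1 = k
        · have h' : pvIter d r k = some nxt := hbk2 ▸ hnxt
          have : nxt = t := by rw [h'] at hk; exact Option.some.inj hk
          subst this
          simp [hterm]
        · have hblt2 : b + 2 ≤ k := by omega
          have h2 : (pvIter d r (b+2)).isSome := hsome (b+2) hblt2
          have hb2eq : pvIter d r (b+2) = pvStep d nxt := by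
            have := hstep_of (b+1) nxt (by omega) hnxt
            simpa [Nat.add_assoc] using this
          rw [hb2eq] at h2
          cases hg2 : pvStep d nxt with
          | none => exfalso; simp [hg2] at h2
          | some fast' =>
            have hfast' : pvIter d r (b+2) = some fast' := by rw [hb2eq, hg2]
            -- slow advances one defined step
            have ha1 : a + 1 ≤ k := by omega
            have hsl1some : (pvIter d r (a+1)).isSome := hsome (a+1) ha1
            have hsl1eq : pvIter d r (a+1) = pvStep d sl := hstep_of a sl (by omega) hsl
            rw [hsl1eq] at hsl1some
            cases hgs : pvStep d sl with
            | none => exfalso; simp [hgs] at hsl1some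
            | some sl' =>
              have hsl' : pvIter d r (a+1) = some sl' := by rw [hsl1eq, hgs]
              have hne : sl' ≠ fast' := by
                intro h
                have := hinj (a+1) (b+2) fast' ha1 hblt2 (h ▸ hsl') hfast'
                omega
              simp only [hg2, Option.bind_some, hgs]
              rw [if_neg (by simpa using hne)]
              exact ih (a+1) (b+2) sl' fast' (by omega) hblt2 hsl' hfast' (by omega)

-- an acyclic chain visits at most parents.length + 1 nodes
theorem chain_short (parents : List (String × Option String)) (r : String) (k : Nat)
    (hsome : ∀ j, j ≤ k → (pvIter (PySem.Dict.mk parents) r j).isSome)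
    (hinj : ∀ i j x, i ≤ k → j ≤ k → pvIter (PySem.Dict.mk parents) r i = some x →
      pvIter (PySem.Dict.mk parents) r j = some x → i = j) :
    k ≤ parents.length := by
  set d := PySem.Dict.mk parents with hd
  set L : List String := (List.range k).map (fun j => (pvIter d r (j+1)).getD "") with hL
  have hval : ∀ j < k, pvIter d r (j+1) = some ((pvIter d r (j+1)).getD "") := by
    intro j hj
    have := hsome (j+1) (by omega)
    cases h : pvIter d r (j+1) with
    | none => rw [h] at this; simp at this
    | some v => simp
  have hnodup : L.Nodup := by
    rw [hL]
    apply List.Nodup.map_on _ (List.nodup_range)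
    intro x hx y hy hxy
    simp only [List.mem_range] at hx hy
    have h1 := hval x hx
    have h2 := hval y hy
    rw [hxy] at h1
    have := hinj (x+1) (y+1) _ (by omega) (by omega) h1 h2
    omega
  have hsub : L ⊆ d.keys := by
    intro x hx
    rw [hL] at hx
    simp only [List.mem_map, List.mem_range] at hx
    obtain ⟨j, hj, hjv⟩ := hx
    have h1 := hval j hj
    rw [hjv] at h1
    -- pvIter (j+1) = some x comes from a pvStep, whose result passed the contains test
    have h0 : (pvIter d r j).isSome := hsome j (by omega)
    cases h0' : pvIter d r j with
    | none => rw [h0'] at h0; simp at h0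
    | some prev =>
      have hstep : pvStep d prev = some x := by
        have : pvIter d r (j+1) = (pvIter d r j).bind (pvStep d) := rfl
        rw [this, h0'] at h1
        simpa using h1
      have hcont : d.contains x = true := by
        unfold pvStep at hstep
        cases hg : (d.get? prev).getD none with
        | none => rw [hg] at hstep; simp at hstep
        | some p =>
          rw [hg] at hstep
          by_cases hc : d.contains p
          · simp [hc] at hstep; rwa [hstep] at hc
          · simp [hc] at hstep
      rwa [← PySem.Dict.contains_iff_mem_keys]
  calc k = L.length := by simp [hL]
    _ ≤ d.keys.length := (hnodup.subperm hsub).length_le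
    _ = parents.length := by simp [hd, PySem.Dict.keys]

-- ===== VERDICT (by name: the statement is the Claim_ definition above) =====
theorem root_for_run_py_spec : Claim_equal_root_for_run_py := by
  intro r parents _
  unfold Spec_root_for_run_py root_for_run_py root_for_run_py_alt
  set d := PySem.Dict.mk parents with hd
  by_cases hc : ∀ m, (pvIter d r m).isSome
  · rw [A_cyclic r d _ r PySem.Set.empty hc, B_cyclic r d _ r (some r) hc]
  · push Not at hc
    obtain ⟨m0, hm0⟩ := hc
    have hm0' : pvIter d r m0 = none := by
      cases h : pvIter d r m0 with
      | none => rfl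
      | some v => rw [h] at hm0; simp at hm0
    have hex : ∃ m, pvIter d r m = none := ⟨m0, hm0'⟩
    classical
    let k0 := Nat.find hex
    have hk0 : pvIter d r k0 = none := Nat.find_spec hex
    have hk0min : ∀ j, j < k0 → pvIter d r j ≠ none := fun j hj => Nat.find_min hex hj
    have hk0pos : 0 < k0 := by
      rcases Nat.eq_zero_or_pos k0 with h | h
      · exfalso; rw [h] at hk0; simp [pvIter] at hk0
      · exact h
    set k := k0 - 1 with hkdef
    have hsome : ∀ j, j ≤ k → (pvIter d r j).isSome := by
      intro j hj
      have := hk0min j (by omega)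
      cases h : pvIter d r j with
      | none => exact absurd h this
      | some v => simp
    have hksome := hsome k (le_refl k)
    obtain ⟨t, ht⟩ : ∃ t, pvIter d r k = some t := by
      cases h : pvIter d r k with
      | none => rw [h] at hksome; simp at hksome
      | some v => exact ⟨v, rfl⟩
    have hterm : pvStep d t = none := by
      have : pvIter d r (k+1) = none := by
        have : k + 1 = k0 := by omega
        rw [this]; exact hk0
      rw [show pvIter d r (k+1) = (pvIter d r k).bind (pvStep d) from rfl, ht] at this
      simpa using this
    have hinj : ∀ i j x, i ≤ k → j ≤ k → pvIter d r i = some x → pvIter d r j = some x → i = j := by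
      intro i j x hik hjk hi hj
      by_contra hne
      -- wlog i < j
      rcases Nat.lt_or_ge i j with hij | hij
      · have hshift := pvIter_shift d r x i hi (k0 - j)
        have hshift2 := pvIter_shift d r x j hj (k0 - j)
        have : pvIter d r (i + (k0 - j)) = none := by
          rw [hshift, ← hshift2, show j + (k0 - j) = k0 by omega]
          exact hk0
        exact hk0min (i + (k0 - j)) (by omega) this
      · have hij' : j < i := by omega
        have hshift := pvIter_shift d r x j hj (k0 - i)
        have hshift2 := pvIter_shift d r x i hi (k0 - i)
        have : pvIter d r (j + (k0 - i)) = none := by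
          rw [hshift, ← hshift2, show i + (k0 - i) = k0 by omega]
          exact hk0
        exact hk0min (j + (k0 - i)) (by omega) this
    have hkn : k ≤ parents.length := chain_short parents r k (hd ▸ hsome) (hd ▸ hinj)
    rw [A_acyclic r d r t k ht hterm hinj hsome (parents.length + 2) 0 r PySem.Set.empty
      (by omega) (by simp [pvIter]) (by intro x hx; simp [PySem.Set.empty] at hx) (by omega)]
    rw [B_acyclic r d r t k ht hterm hinj hsome (parents.length + 2) 0 0 r r
      (le_refl 0) (by omega) (by simp [pvIter]) (by simp [pvIter]) (by omega)]
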